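-- pv_equiv track=rewrite | github.com/ivifp1712/Calculadora-beta | ec.py | negsum
-- ===== SOURCE A (Python) =====
-- def isnum(string):
--     try:
--         int(string)
--         return True
--     except ValueError:
--         return False
--
-- def negsum(ec):
--     pneg = []
--     neg = []
--     sum = []
--     if ec[0] == "-":
--         neg.append("")
--         for y in range(1,(len(ec))):
--             #if ec[y] != "-" and ec[y] != "+":
--             if isnum(ec[y]) == True:
--                 neg[0] = neg[0] + ec[y]
--             else:
--                 if ec[y] == ".":
--                     neg[0] = neg[0] + ec[y]
--                 else:
--                     break
--         pneg.append(ec[0])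
--     else:
--         sum.append("")
--         for y in range(0,(len(ec))):
--             #if ec[y] != "-" and ec[y] != "+":
--             if isnum(ec[y]) == True:
--                 sum[0] = sum[0] + ec[y]
--             else:
--                 if ec[y] == ".":
--                     sum[0] = sum[0] + ec[y]
--                 else:
--                     break
--     for x in range(1,len(ec)):
--         if ec[x] == "-":
--             neg.append("")
--             if len(neg) == 1:
--                 long = 0
--             else:
--                 long = len(neg)-1
--             for y in range((x+1),(len(ec))):
--                 #if ec[y] != "-" and ec[y] != "+":
--                 if isnum(ec[y]) == True:
--                     neg[long] = neg[long] + ec[y]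
--                 else:
--                     if ec[y] == ".":
--                         neg[long] = neg[long] + ec[y]
--                     else:
--                         break
--             pneg.append(ec[x])
--         elif ec[x] == "+":
--             sum.append("")
--             if len(sum) == 1:
--                 long = 0
--             else:
--                 long = len(sum)-1
--             for y in range((x+1),(len(ec))):
--                 #if ec[y] != "-" and ec[y] != "+":
--                 if isnum(ec[y]) == True:
--                     sum[long] = sum[long] + ec[y]
--                 else:
--                     if ec[y] == ".":
--                         sum[long] = sum[long] + ec[y]
--                     else:
--                         break
--         elif ec[x] == "(":
--             sum.append("")
--             if len(sum) == 1:
--                 long = 0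
--             else:
--                 long = len(sum)-1
--             for y in range((x+1),(len(ec))):
--                 #if ec[y] != "-" and ec[y] != "+":
--                 if isnum(ec[y]) == True:
--                     sum[long] = sum[long] + ec[y]
--                 else:
--                     if ec[y] == ".":
--                         sum[long] = sum[long] + ec[y]
--                     else:
--                         break
--     return neg, sum, pneg
-- ===== SOURCE B (Python) =====
-- def negsum(ec):
--     neg = []
--     sum = []
--     pneg = []
--     target = None  # list whose last slot is currently collecting, or None
--     for i, ch in enumerate(ec):
--         if i == 0 and ch != "-":
--             sum.append("")
--             if "0" <= ch <= "9" or ch == ".":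
--                 sum[-1] += ch
--                 target = sum
--             else:
--                 target = None
--         elif ch == "-":
--             neg.append("")
--             pneg.append(ch)
--             target = neg
--         elif ch == "+" or ch == "(":
--             sum.append("")
--             target = sum
--         elif ("0" <= ch <= "9" or ch == ".") and target is not None:
--             target[-1] += ch
--         else:
--             target = None
--     return neg, sum, pneg
-- ===== Notes on version B (the rewrite author's own statement) =====
-- stated objective: alternative
-- what changed: A re-scans forward from every minus/plus/open-parenthesis operator (and from index 0) to collect the following number; B makes one single left-to-right pass over ec, appending each digit/dot character to the currently collecting slot and switching or clearing the collection target at operators and other characters.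
import Mathlib
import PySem

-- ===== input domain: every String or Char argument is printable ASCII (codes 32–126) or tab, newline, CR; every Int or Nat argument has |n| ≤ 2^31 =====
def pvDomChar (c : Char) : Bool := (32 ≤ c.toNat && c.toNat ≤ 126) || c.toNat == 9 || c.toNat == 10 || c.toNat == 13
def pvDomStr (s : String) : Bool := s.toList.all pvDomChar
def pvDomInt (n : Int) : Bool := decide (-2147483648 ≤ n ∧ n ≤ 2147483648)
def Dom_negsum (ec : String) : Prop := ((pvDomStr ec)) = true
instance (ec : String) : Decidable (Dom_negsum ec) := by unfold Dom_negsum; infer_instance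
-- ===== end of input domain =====

-- B replaces A's per-operator forward re-scans with one single left-to-right pass
-- that appends each collectible character to the currently collecting slot (objective: alternative).

-- ===== PORT A =====
-- A's isnum: int(string) succeeds (ValueError → False)
def pvIsnum (s : String) : Bool := (PySem.Int.ofStr? s).isSome

-- A's inner 'for y in range(start, len(ec)) … break' scan, as structural recursion on ec[start:]
def pvScanA (l : List Char) (acc : List Char) : List Char :=
  match l with
  | [] => acc
  | c :: rest =>
    if pvIsnum (String.ofList [c]) then pvScanA rest (acc ++ [c])
    else if c = '.' then pvScanA rest (acc ++ [c])
    else acc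

-- A's main 'for x in range(1, len(ec))' loop, as recursion on the suffix ec[x:];
-- appending '' then writing at index long (the last slot) is modelled as appending the scanned run
def pvLoopA (l : List Char) (neg sum : List (List Char)) (pneg : List Char) :
    List (List Char) × List (List Char) × List Char :=
  match l with
  | [] => (neg, sum, pneg)
  | c :: rest =>
    if c = '-' then pvLoopA rest (neg ++ [pvScanA rest []]) sum (pneg ++ [c])
    else if c = '+' then pvLoopA rest neg (sum ++ [pvScanA rest []]) pneg
    else if c = '(' then pvLoopA rest neg (sum ++ [pvScanA rest []]) pneg
    else pvLoopA rest neg sum pneg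

def negsum (ec : String) : List String × List String × List String :=
  match ec.toList with
  | [] => ([], [], [])   -- Python raises IndexError on ec[0]; excluded by Pre_negsum
  | c :: rest =>
    let st0 :=
      if c = '-' then ([pvScanA rest []], ([] : List (List Char)), [c])
      else (([] : List (List Char)), [pvScanA (c :: rest) []], ([] : List Char))
    let st := pvLoopA rest st0.1 st0.2.1 st0.2.2
    (st.1.map String.ofList, st.2.1.map String.ofList, st.2.2.map (fun d => String.ofList [d]))

-- ===== PORT B =====
-- B's digit test  "0" <= ch <= "9"
def pvDigit (c : Char) : Bool := decide ('0' ≤ c) && decide (c ≤ '9')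

-- target[-1] += ch
def pvAppendLast (l : List (List Char)) (c : Char) : List (List Char) :=
  match l with
  | [] => []
  | [s] => [s ++ [c]]
  | s :: rest => s :: pvAppendLast rest c

-- enumerate(ec)
def pvEnum (i : Nat) (l : List Char) : List (Nat × Char) :=
  match l with
  | [] => []
  | c :: rest => (i, c) :: pvEnum (i + 1) rest

-- loop body of B; state = ((neg, sum, pneg), target), target: some true = neg, some false = sum, none = not collecting
def pvStepB (st : (List (List Char) × List (List Char) × List Char) × Option Bool)
    (p : Nat × Char) : (List (List Char) × List (List Char) × List Char) × Option Bool :=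
  let neg := st.1.1
  let sum := st.1.2.1
  let pneg := st.1.2.2
  let tgt := st.2
  if p.1 = 0 ∧ p.2 ≠ '-' then
    if pvDigit p.2 || p.2 = '.' then ((neg, sum ++ [[p.2]], pneg), some false)
    else ((neg, sum ++ [[]], pneg), none)
  else if p.2 = '-' then ((neg ++ [[]], sum, pneg ++ [p.2]), some true)
  else if p.2 = '+' ∨ p.2 = '(' then ((neg, sum ++ [[]], pneg), some false)
  else if (pvDigit p.2 || p.2 = '.') && tgt.isSome then
    match tgt with
    | some true => ((pvAppendLast neg p.2, sum, pneg), tgt)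
    | some false => ((neg, pvAppendLast sum p.2, pneg), tgt)
    | none => ((neg, sum, pneg), none)
  else ((neg, sum, pneg), none)

def negsum_alt (ec : String) : List String × List String × List String :=
  let st := (pvEnum 0 ec.toList).foldl pvStepB (([], [], []), none)
  (st.1.1.map String.ofList, st.1.2.1.map String.ofList, st.1.2.2.map (fun d => String.ofList [d]))

-- ===== PRECONDITION & SPEC =====
-- Pre_ excludes only the empty string, on which A's ec[0] raises IndexError
def Pre_negsum (ec : String) : Prop := ec ≠ ""
instance (ec : String) : Decidable (Pre_negsum ec) := by unfold Pre_negsum; infer_instance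
def pvWitness_negsum : String := "-12+3.5"

def Spec_negsum (ec : String) (out : List String × List String × List String) : Prop := out = negsum_alt ec
instance (ec : String) (out : List String × List String × List String) : Decidable (Spec_negsum ec out) := by unfold Spec_negsum; infer_instance

-- ===== CLAIM (what is proved, stated in full; the proofs are below) =====
def Claim_equal_negsum : Prop := ∀ (ec : String), Dom_negsum ec → Pre_negsum ec → Spec_negsum ec (negsum ec)

-- ===== LEMMAS AND PROOFS =====

lemma pv_dom_lt {c : Char} (h : pvDomChar c = true) : c.toNat < 127 := by
  simp [pvDomChar] at h; omega

-- A's int()-based single-character test agrees with B's '0' ≤ ch ≤ '9' on ASCII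
lemma pv_digit_eq (c : Char) (h : c.toNat < 127) :
    pvIsnum (String.ofList [c]) = pvDigit c := by
  have h2 : ∀ n : Fin 127, pvIsnum (String.ofList [Char.ofNat n.val]) = pvDigit (Char.ofNat n.val) := by decide
  have := h2 ⟨c.toNat, h⟩
  simpa [Char.ofNat_toNat] using this

lemma pv_appendLast_snoc (l : List (List Char)) (acc : List Char) (c : Char) :
    pvAppendLast (l ++ [acc]) c = l ++ [acc ++ [c]] := by
  induction l with
  | nil => simp [pvAppendLast]
  | cons s rest ih =>
    cases rest with
    | nil => simp [pvAppendLast]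
    | cons t ts => simp [pvAppendLast] at ih ⊢; exact ih

-- main invariant: B's single pass from index ≥ 1, with the current collecting slot holding acc,
-- computes exactly A's per-operator scans
lemma pv_main (l : List Char) (hl : ∀ c ∈ l, c.toNat < 127) :
    (∀ k (neg sum : List (List Char)) (pneg : List Char) (acc : List Char),
       (List.foldl pvStepB ((neg ++ [acc], sum, pneg), some true) (pvEnum (k+1) l)).1
         = pvLoopA l (neg ++ [pvScanA l acc]) sum pneg)
  ∧ (∀ k (neg sum : List (List Char)) (pneg : List Char) (acc : List Char),
       (List.foldl pvStepB ((neg, sum ++ [acc], pneg), some false) (pvEnum (k+1) l)).1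
         = pvLoopA l neg (sum ++ [pvScanA l acc]) pneg)
  ∧ (∀ k (neg sum : List (List Char)) (pneg : List Char),
       (List.foldl pvStepB ((neg, sum, pneg), none) (pvEnum (k+1) l)).1
         = pvLoopA l neg sum pneg) := by
  induction l with
  | nil => simp [pvEnum, pvScanA, pvLoopA]
  | cons c rest ih =>
    have hc : c.toNat < 127 := hl c (by simp)
    have hrest : ∀ c ∈ rest, c.toNat < 127 := fun d hd => hl d (by simp [hd])
    obtain ⟨ihT, ihF, ihN⟩ := ih hrest
    have hde := pv_digit_eq c hc
    have hdm : pvDigit '-' = false := by decide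
    have hdp : pvDigit '+' = false := by decide
    have hdl : pvDigit '(' = false := by decide
    refine ⟨?_, ?_, ?_⟩
    · intro k neg sum pneg acc
      by_cases h1 : c = '-'
      · subst h1
        simpa [pvEnum, pvStepB, pvScanA, pvLoopA, hde, hdm, List.append_assoc]
          using ihT (k+1) (neg ++ [acc]) sum (pneg ++ ['-']) []
      · by_cases h2 : c = '+'
        · subst h2
          simpa [pvEnum, pvStepB, pvScanA, pvLoopA, hde, hdp, List.append_assoc]
            using ihF (k+1) (neg ++ [acc]) sum pneg []
        · by_cases h3 : c = '('
          · subst h3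
            simpa [pvEnum, pvStepB, pvScanA, pvLoopA, hde, hdl, List.append_assoc]
              using ihF (k+1) (neg ++ [acc]) sum pneg []
          · have hnp : ¬ (c = '+' ∨ c = '(') := by tauto
            by_cases hd : pvDigit c = true
            · simpa [pvEnum, pvStepB, pvScanA, pvLoopA, hde, h1, h2, h3, hnp, hd,
                     pv_appendLast_snoc, List.append_assoc]
                using ihT (k+1) neg sum pneg (acc ++ [c])
            · by_cases hdot : c = '.'
              · subst hdot
                simpa [pvEnum, pvStepB, pvScanA, pvLoopA, hde, h1, h2, h3, hnp, hd,
                       pv_appendLast_snoc, List.append_assoc]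
                  using ihT (k+1) neg sum pneg (acc ++ ['.'])
              · simpa [pvEnum, pvStepB, pvScanA, pvLoopA, hde, h1, h2, h3, hnp, hd, hdot]
                  using ihN (k+1) (neg ++ [acc]) sum pneg
    · intro k neg sum pneg acc
      by_cases h1 : c = '-'
      · subst h1
        simpa [pvEnum, pvStepB, pvScanA, pvLoopA, hde, hdm, List.append_assoc]
          using ihT (k+1) neg (sum ++ [acc]) (pneg ++ ['-']) []
      · by_cases h2 : c = '+'
        · subst h2
          simpa [pvEnum, pvStepB, pvScanA, pvLoopA, hde, hdp, List.append_assoc]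
            using ihF (k+1) neg (sum ++ [acc]) pneg []
        · by_cases h3 : c = '('
          · subst h3
            simpa [pvEnum, pvStepB, pvScanA, pvLoopA, hde, hdl, List.append_assoc]
              using ihF (k+1) neg (sum ++ [acc]) pneg []
          · have hnp : ¬ (c = '+' ∨ c = '(') := by tauto
            by_cases hd : pvDigit c = true
            · simpa [pvEnum, pvStepB, pvScanA, pvLoopA, hde, h1, h2, h3, hnp, hd,
                     pv_appendLast_snoc, List.append_assoc]
                using ihF (k+1) neg sum pneg (acc ++ [c])
            · by_cases hdot : c = '.'
              · subst hdot
                simpa [pvEnum, pvStepB, pvScanA, pvLoopA, hde, h1, h2, h3, hnp, hd,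
                       pv_appendLast_snoc, List.append_assoc]
                  using ihF (k+1) neg sum pneg (acc ++ ['.'])
              · simpa [pvEnum, pvStepB, pvScanA, pvLoopA, hde, h1, h2, h3, hnp, hd, hdot]
                  using ihN (k+1) neg (sum ++ [acc]) pneg
    · intro k neg sum pneg
      by_cases h1 : c = '-'
      · subst h1
        simpa [pvEnum, pvStepB, pvScanA, pvLoopA, hde, hdm]
          using ihT (k+1) neg sum (pneg ++ ['-']) []
      · by_cases h2 : c = '+'
        · subst h2
          simpa [pvEnum, pvStepB, pvScanA, pvLoopA, hde, hdp]
            using ihF (k+1) neg sum pneg []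
        · by_cases h3 : c = '('
          · subst h3
            simpa [pvEnum, pvStepB, pvScanA, pvLoopA, hde, hdl]
              using ihF (k+1) neg sum pneg []
          · have hnp : ¬ (c = '+' ∨ c = '(') := by tauto
            simpa [pvEnum, pvStepB, pvScanA, pvLoopA, hde, h1, hnp, h2, h3]
              using ihN (k+1) neg sum pneg

-- ===== VERDICT (by name: the statement is the Claim_ definition above) =====
theorem negsum_spec : Claim_equal_negsum := by
  intro ec hdom hpre
  unfold Spec_negsum
  have hchars : ∀ c ∈ ec.toList, c.toNat < 127 := by
    intro c hcmem
    have := hdom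
    unfold Dom_negsum pvDomStr at this
    exact pv_dom_lt (by simpa using (List.all_eq_true.mp this c hcmem))
  unfold negsum negsum_alt
  cases hec : ec.toList with
  | nil => exact absurd (by simpa using congrArg String.ofList hec) hpre
  | cons c rest =>
    rw [hec] at hchars
    have hc : c.toNat < 127 := hchars c (by simp)
    have hrest : ∀ d ∈ rest, d.toNat < 127 := fun d hd => hchars d (by simp [hd])
    obtain ⟨mT, mF, mN⟩ := pv_main rest hrest
    have hde := pv_digit_eq c hc
    by_cases h1 : c = '-'
    · subst h1
      have := mT 0 [] [] ['-'] []
      simp [pvEnum, pvStepB] at this ⊢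
      simp [this]
    · by_cases hd : pvDigit c = true
      · have := mF 0 [] [] [] [c]
        simp [pvEnum, pvStepB, pvScanA, hde, h1, hd] at this ⊢
        simp [this]
      · by_cases hdot : c = '.'
        · subst hdot
          have := mF 0 [] [] [] ['.']
          simp [pvEnum, pvStepB, pvScanA, hde, hd] at this ⊢
          simp [this]
        · have := mN 0 [] [[]] []
          simp [pvEnum, pvStepB, pvScanA, hde, h1, hd, hdot] at this ⊢
          simp [this]
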